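-- pv_equiv track=rewrite | github.com/tonyhdz24/cs437-final | src/retriever.py | _check_phrase_positions
-- ===== SOURCE A (Python) =====
-- from typing import Dict, List, Tuple, Optional, Set
--
-- def _check_phrase_positions(term_positions: List[Set[int]]) -> bool:
--     """Check if positions allow consecutive occurrence."""
--     if not term_positions or not term_positions[0]:
--         return False
--
--     # For each starting position of first term
--     for start_pos in term_positions[0]:
--         found = True
--         for i, positions in enumerate(term_positions[1:], 1):
--             if (start_pos + i) not in positions:
--                 found = False
--                 break
--         if found:
--             return True
--
--     return False
-- ===== SOURCE B (Python) =====
-- def _check_phrase_positions(term_positions):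
--     """Check if positions allow consecutive occurrence (backward suffix pass)."""
--     if not term_positions:
--         return False
--     valid = set(term_positions[-1])
--     for positions in reversed(term_positions[:-1]):
--         valid = {p for p in positions if p + 1 in valid}
--     return bool(valid)
-- ===== Notes on version B (the rewrite author's own statement) =====
-- stated objective: alternative
-- what changed: B runs a backward pass propagating the set of positions where the phrase suffix can start (from the last term set toward the first), instead of anchoring on each start of the first set and scanning every later set with offsets.
import Mathlib
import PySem

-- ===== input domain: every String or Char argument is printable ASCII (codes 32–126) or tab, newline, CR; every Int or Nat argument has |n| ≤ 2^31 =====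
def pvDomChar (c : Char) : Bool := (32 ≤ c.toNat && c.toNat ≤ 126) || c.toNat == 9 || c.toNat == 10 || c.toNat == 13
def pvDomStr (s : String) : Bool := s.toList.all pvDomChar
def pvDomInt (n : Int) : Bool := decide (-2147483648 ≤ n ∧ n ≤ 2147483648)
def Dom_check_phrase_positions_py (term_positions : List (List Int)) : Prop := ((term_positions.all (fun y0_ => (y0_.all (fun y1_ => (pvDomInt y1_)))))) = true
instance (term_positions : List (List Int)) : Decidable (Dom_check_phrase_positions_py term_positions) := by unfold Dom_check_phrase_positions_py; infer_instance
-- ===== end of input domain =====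

-- B replaces A's per-start forward scan by a single backward pass computing the
-- positions where the phrase suffix can start (alternative decomposition).

-- ===== PORT A =====
-- inner loop of A: for i, positions in enumerate(term_positions[1:], 1): break on miss
def pvInnerA (start : Int) : List (List Int) → Int → Bool
  | [], _ => true
  | ps :: rest, i => if ps.contains (start + i) then pvInnerA start rest (i + 1) else false

def check_phrase_positions_py (term_positions : List (List Int)) : Bool :=
  match term_positions with
  | [] => false
  | first :: rest =>
    if first.isEmpty then false
    else first.any (fun start_pos => pvInnerA start_pos rest 1)

-- ===== PORT B =====
-- backward pass of B: valid = last set; for positions in reversed(term_positions[:-1]):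
--   valid = {p for p in positions if p + 1 in valid}
def pvBack : List (List Int) → List Int
  | [] => []
  | [last] => last
  | ps :: rest => (pvBack rest) |> fun valid => ps.filter (fun p => valid.contains (p + 1))

def check_phrase_positions_py_alt (term_positions : List (List Int)) : Bool :=
  match term_positions with
  | [] => false
  | _ :: _ => !(pvBack term_positions).isEmpty

-- ===== PRECONDITION & SPEC =====
def Spec_check_phrase_positions_py (term_positions : List (List Int)) (out : Bool) : Prop := out = check_phrase_positions_py_alt term_positions
instance (term_positions : List (List Int)) (out : Bool) : Decidable (Spec_check_phrase_positions_py term_positions out) := by unfold Spec_check_phrase_positions_py; infer_instance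

-- ===== CLAIM (what is proved, stated in full; the proofs are below) =====
def Claim_equal_check_phrase_positions_py : Prop := ∀ (term_positions : List (List Int)), Dom_check_phrase_positions_py term_positions → Spec_check_phrase_positions_py term_positions (check_phrase_positions_py term_positions)

-- ===== LEMMAS AND PROOFS =====
theorem pvInnerA_shift (rest : List (List Int)) : ∀ (s i : Int),
    pvInnerA s rest (i + 1) = pvInnerA (s + 1) rest i := by
  induction rest with
  | nil => intro s i; rfl
  | cons ps tl ih =>
    intro s i
    have h : s + (i + 1) = s + 1 + i := by ring
    simp [pvInnerA, h, ih]

theorem mem_pvBack (rest : List (List Int)) : ∀ (ps : List Int) (p : Int),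
    p ∈ pvBack (ps :: rest) ↔ p ∈ ps ∧ pvInnerA p rest 1 = true := by
  induction rest with
  | nil => intro ps p; simp [pvBack, pvInnerA]
  | cons q r ih =>
    intro ps p
    show p ∈ ps.filter (fun x => (pvBack (q :: r)).contains (x + 1)) ↔ _
    rw [List.mem_filter]
    simp only [List.contains_iff_mem]
    rw [ih q (p + 1)]
    constructor
    · rintro ⟨hp, hq, hr⟩
      refine ⟨hp, ?_⟩
      simp only [pvInnerA, List.contains_iff_mem, hq, if_pos]
      rw [pvInnerA_shift]
      exact hr
    · rintro ⟨hp, h⟩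
      simp only [pvInnerA] at h
      by_cases hq : q.contains (p + 1) = true
      · rw [if_pos hq] at h
        rw [pvInnerA_shift r p 1] at h
        exact ⟨hp, List.contains_iff_mem.mp hq, h⟩
      · rw [if_neg hq] at h; exact absurd h (by simp)

-- ===== VERDICT (by name: the statement is the Claim_ definition above) =====
theorem check_phrase_positions_py_spec : Claim_equal_check_phrase_positions_py := by
  intro tp _
  unfold Spec_check_phrase_positions_py check_phrase_positions_py check_phrase_positions_py_alt
  cases tp with
  | nil => rfl
  | cons first rest =>
    by_cases h : first.isEmpty = true
    · have : first = [] := List.isEmpty_iff.mp h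
      subst this
      cases rest with
      | nil => simp [pvBack]
      | cons q r => simp [h, pvBack]
    · simp only [h, Bool.false_eq_true, if_false]
      rw [Bool.eq_iff_iff, List.any_eq_true, Bool.not_eq_true', List.isEmpty_eq_false_iff_exists_mem]
      constructor
      · rintro ⟨p, hp, hr⟩
        exact ⟨p, (mem_pvBack rest first p).mpr ⟨hp, hr⟩⟩
      · rintro ⟨p, hp⟩
        obtain ⟨h1, h2⟩ := (mem_pvBack rest first p).mp hp
        exact ⟨p, h1, h2⟩
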